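-- pv_equiv track=rewrite | github.com/gudrb4869/algorithm | 프로그래머스/level3/카드 짝 맞추기.py | ctrlMove
-- ===== SOURCE A (Python) =====
-- def ctrlMove(r, c, dr, dc, board):
--     nr, nc = r + dr, c + dc
--     if 0 <= nr < 4 and 0 <= nc < 4:
--         if board[nr * 4 + nc] == '0':
--             return ctrlMove(nr, nc, dr, dc, board)
--         else:
--             return nr, nc
--     else:
--          return r, c
-- ===== SOURCE B (Python) =====
-- def ctrlMove(r, c, dr, dc, board):
--     # Enumerate step multiples k from the fixed origin instead of recursing on the
--     # current position; `last` is the last free cell reached.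
--     last = (r, c)
--     for k in range(1, 9):
--         nr, nc = r + k * dr, c + k * dc
--         if not (0 <= nr < 4 and 0 <= nc < 4):
--             return last
--         if board[nr * 4 + nc] != '0':
--             return (nr, nc)
--         last = (nr, nc)
--     return last
-- ===== Notes on version B (the rewrite author's own statement) =====
-- stated objective: alternative
-- what changed: Instead of tail-recursing on the moving position, B enumerates the step multiples k=1,2,... from the fixed start, computing each candidate cell as (r+k*dr, c+k*dc) and keeping the last free cell in an accumulator; 8 multiples suffice since at most 4 consecutive cells of a 4-wide board lie on the ray.
-- outside the precondition, e.g. on ctrlMove(0, 0, 0, 1, ['1', '1']): A returns (0, 1), B returns (0, 1)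
-- crash fix: When dr = dc = 0, (r,c) is on the board and that cell holds '0', A recurses forever (RecursionError) while B returns (r, c). — e.g. on ctrlMove(0, 0, 0, 0, ["0"]): A raises RecursionError, B returns (0, 0)
import Mathlib
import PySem

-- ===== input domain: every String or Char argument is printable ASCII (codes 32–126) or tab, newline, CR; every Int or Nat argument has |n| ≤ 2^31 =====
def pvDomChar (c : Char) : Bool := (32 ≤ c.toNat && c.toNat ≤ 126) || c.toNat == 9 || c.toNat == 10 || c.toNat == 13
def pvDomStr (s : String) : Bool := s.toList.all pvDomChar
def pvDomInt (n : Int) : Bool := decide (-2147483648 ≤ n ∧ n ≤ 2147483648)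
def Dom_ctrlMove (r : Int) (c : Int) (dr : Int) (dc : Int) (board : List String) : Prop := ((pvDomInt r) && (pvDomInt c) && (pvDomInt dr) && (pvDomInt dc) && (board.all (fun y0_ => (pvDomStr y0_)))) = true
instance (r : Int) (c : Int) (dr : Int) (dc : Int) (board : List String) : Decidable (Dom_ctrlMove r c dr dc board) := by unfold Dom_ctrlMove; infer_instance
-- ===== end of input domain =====

-- B replaces A's tail recursion on the moving position by an enumeration of the step
-- multiples k = 1, 2, … from the fixed start cell, keeping the last free cell in an
-- accumulator (objective: alternative decomposition, same cost).

-- ===== PORT A =====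
-- A's tail recursion on the current position, with fuel making it total in Lean; inside
-- Pre_ctrlMove at most 5 guard evaluations ever happen (a 4x4 board), so fuel 8 never
-- runs out on admitted inputs.
def ctrlMoveRec : Nat → Int → Int → Int → Int → List String → Int × Int
  | 0, r, c, _, _, _ => (r, c)
  | fuel + 1, r, c, dr, dc, board =>
    if 0 ≤ r + dr ∧ r + dr < 4 ∧ 0 ≤ c + dc ∧ c + dc < 4 then
      if PySem.List.pyGet? board ((r + dr) * 4 + (c + dc)) = some "0" then
        ctrlMoveRec fuel (r + dr) (c + dc) dr dc board
      else (r + dr, c + dc)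
    else (r, c)

def ctrlMove (r : Int) (c : Int) (dr : Int) (dc : Int) (board : List String) : Int × Int :=
  ctrlMoveRec 8 r c dr dc board

-- ===== PORT B =====
-- B's for-loop over k in range(1, 9): each candidate cell is (r + k*dr, c + k*dc)
-- computed from the fixed origin; `last` is the last free cell reached so far.
def ctrlMoveScan (r : Int) (c : Int) (dr : Int) (dc : Int) (board : List String) :
    List Int → Int × Int → Int × Int
  | [], last => last
  | k :: ks, last =>
    if ¬(0 ≤ r + k * dr ∧ r + k * dr < 4 ∧ 0 ≤ c + k * dc ∧ c + k * dc < 4) then last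
    else if ¬(PySem.List.pyGet? board ((r + k * dr) * 4 + (c + k * dc)) = some "0") then
      (r + k * dr, c + k * dc)
    else ctrlMoveScan r c dr dc board ks (r + k * dr, c + k * dc)

def ctrlMove_alt (r : Int) (c : Int) (dr : Int) (dc : Int) (board : List String) : Int × Int :=
  ctrlMoveScan r c dr dc board (PySem.List.pyRange 1 9 1) (r, c)

-- ===== PRECONDITION & SPEC =====
-- Pre_ excludes inputs on which Python A does not return: an IndexError when the walk
-- indexes a board shorter than 16, and a RecursionError when dr = dc = 0 lands in bounds
-- on a '0' cell (A recurses forever; B's Python accesses the same cells, so it raises the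
-- same IndexError and only differs on the RecursionError region, stated in Raises_).
-- It narrows slightly: when the first step is in bounds it demands all 16 cells exist,
-- though A only touches the cells actually visited (see the cite in claim.json).
def Pre_ctrlMove (r : Int) (c : Int) (dr : Int) (dc : Int) (board : List String) : Prop :=
  (0 ≤ r + dr ∧ r + dr < 4 ∧ 0 ≤ c + dc ∧ c + dc < 4) →
    (16 ≤ board.length ∧
      ¬(dr = 0 ∧ dc = 0 ∧ PySem.List.pyGet? board ((r + dr) * 4 + (c + dc)) = some "0"))

instance (r : Int) (c : Int) (dr : Int) (dc : Int) (board : List String) : Decidable (Pre_ctrlMove r c dr dc board) := by unfold Pre_ctrlMove; infer_instance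

def pvWitness_ctrlMove : Int × Int × Int × Int × List String :=
  (0, 0, 0, 1, ["1","0","1","0","0","0","0","0","1","1","1","1","0","0","0","0"])

-- A raises RecursionError when dr = dc = 0, (r,c) is on the board and that cell is '0';
-- B returns (r, c) there.
def Raises_ctrlMove (r : Int) (c : Int) (dr : Int) (dc : Int) (board : List String) : Prop :=
  dr = 0 ∧ dc = 0 ∧ 0 ≤ r ∧ r < 4 ∧ 0 ≤ c ∧ c < 4 ∧
    PySem.List.pyGet? board (r * 4 + c) = some "0"
instance (r : Int) (c : Int) (dr : Int) (dc : Int) (board : List String) : Decidable (Raises_ctrlMove r c dr dc board) := by unfold Raises_ctrlMove; infer_instance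

def pvRaiseWitness_ctrlMove : Int × Int × Int × Int × List String := (0, 0, 0, 0, ["0"])
def pvRaiseWitnessOut_ctrlMove : Int × Int := (0, 0)

def Spec_ctrlMove (r : Int) (c : Int) (dr : Int) (dc : Int) (board : List String) (out : Int × Int) : Prop := out = ctrlMove_alt r c dr dc board
instance (r : Int) (c : Int) (dr : Int) (dc : Int) (board : List String) (out : Int × Int) : Decidable (Spec_ctrlMove r c dr dc board out) := by unfold Spec_ctrlMove; infer_instance

-- ===== CLAIM (what is proved, stated in full; the proofs are below) =====
def Claim_equal_ctrlMove : Prop := ∀ (r : Int) (c : Int) (dr : Int) (dc : Int) (board : List String), Dom_ctrlMove r c dr dc board → Pre_ctrlMove r c dr dc board → Spec_ctrlMove r c dr dc board (ctrlMove r c dr dc board)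

def Claim_raises_ctrlMove : Prop := (∀ (r : Int) (c : Int) (dr : Int) (dc : Int) (board : List String), Dom_ctrlMove r c dr dc board → Raises_ctrlMove r c dr dc board → ¬ Pre_ctrlMove r c dr dc board) ∧ (Dom_ctrlMove (pvRaiseWitness_ctrlMove.1) (pvRaiseWitness_ctrlMove.2.1) (pvRaiseWitness_ctrlMove.2.2.1) (pvRaiseWitness_ctrlMove.2.2.2.1) (pvRaiseWitness_ctrlMove.2.2.2.2) ∧ Raises_ctrlMove (pvRaiseWitness_ctrlMove.1) (pvRaiseWitness_ctrlMove.2.1) (pvRaiseWitness_ctrlMove.2.2.1) (pvRaiseWitness_ctrlMove.2.2.2.1) (pvRaiseWitness_ctrlMove.2.2.2.2) ∧ ctrlMove_alt (pvRaiseWitness_ctrlMove.1) (pvRaiseWitness_ctrlMove.2.1) (pvRaiseWitness_ctrlMove.2.2.1) (pvRaiseWitness_ctrlMove.2.2.2.1) (pvRaiseWitness_ctrlMove.2.2.2.2) = pvRaiseWitnessOut_ctrlMove)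

-- ===== LEMMAS AND PROOFS =====

-- Proof-only helper: the integer list [a, a+1, …, a+n-1].
def intRange (a : Int) : Nat → List Int
  | 0 => []
  | n + 1 => a :: intRange (a + 1) n

-- Core invariant: scanning the multiples k+1, …, k+n from the origin, with the current
-- cell (r + k*dr, c + k*dc) as accumulator, is A's fueled recursion from that cell.
theorem scan_eq_rec (n : Nat) (k r c dr dc : Int) (board : List String) :
    ctrlMoveScan r c dr dc board (intRange (k + 1) n) (r + k * dr, c + k * dc)
      = ctrlMoveRec n (r + k * dr) (c + k * dc) dr dc board := by
  induction n generalizing k with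
  | zero => rfl
  | succ n ih =>
    have e1 : r + (k + 1) * dr = r + k * dr + dr := by ring
    have e2 : c + (k + 1) * dc = c + k * dc + dc := by ring
    simp only [intRange, ctrlMoveScan, ctrlMoveRec, e1, e2]
    by_cases h : 0 ≤ r + k * dr + dr ∧ r + k * dr + dr < 4 ∧ 0 ≤ c + k * dc + dc ∧ c + k * dc + dc < 4
    · by_cases h0 : PySem.List.pyGet? board ((r + k * dr + dr) * 4 + (c + k * dc + dc)) = some "0"
      · have := ih (k + 1)
        simp only [e1, e2] at this
        simpa [h, h0] using this
      · simp [h, h0]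
    · simp [h]

theorem pyRange_1_9 : PySem.List.pyRange 1 9 1 = intRange 1 8 := by decide

-- ===== VERDICT (by name: the statement is the Claim_ definition above) =====
theorem ctrlMove_spec : Claim_equal_ctrlMove := by
  intro r c dr dc board _ _
  unfold Spec_ctrlMove ctrlMove ctrlMove_alt
  rw [pyRange_1_9]
  have := scan_eq_rec 8 0 r c dr dc board
  simpa using this.symm

theorem raises_outside_pre : ∀ (r : Int) (c : Int) (dr : Int) (dc : Int) (board : List String), Dom_ctrlMove r c dr dc board → Raises_ctrlMove r c dr dc board → ¬ Pre_ctrlMove r c dr dc board := by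
  intro r c dr dc board _ hR hP
  obtain ⟨hdr, hdc, hr0, hr4, hc0, hc4, hcell⟩ := hR
  subst hdr; subst hdc
  exact (hP (by simp [hr0, hr4, hc0, hc4])).2 ⟨rfl, rfl, by simpa using hcell⟩

theorem ctrlMove_raises : Claim_raises_ctrlMove := by
  unfold Claim_raises_ctrlMove; exact ⟨raises_outside_pre, by decide⟩

-- Self-check: B's port really returns the stated literal at the raise witness.
theorem ctrlMove_raise_witness_ok :
    ctrlMove_alt (pvRaiseWitness_ctrlMove.1) (pvRaiseWitness_ctrlMove.2.1)
      (pvRaiseWitness_ctrlMove.2.2.1) (pvRaiseWitness_ctrlMove.2.2.2.1)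
      (pvRaiseWitness_ctrlMove.2.2.2.2) = pvRaiseWitnessOut_ctrlMove :=
  ctrlMove_raises.2.2.2
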